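-- pv_equiv track=rewrite | github.com/PrefectHQ/prefect | src/prefect/cli/_app.py | _normalize_top_level_flags
-- ===== SOURCE A (Python) =====
-- _TOP_LEVEL_SHORT_FLAGS = {"-p": "--profile"}
--
-- _MULTICHAR_SHORT_FLAGS = {
--     "-jv": "--job-variable",
--     "-cl": "--concurrency-limit",
-- }
--
-- def _normalize_top_level_flags(args: list[str]) -> list[str]:
--     """Rewrite short flags to long form when they appear before the command.
--
--     Only rewrites flags that appear before the first non-flag token (the
--     command name).  After the command, all tokens pass through unchanged
--     so subcommand flags like ``worker start -p pool`` are not affected.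
--     """
--     result = []
--     seen_command = False
--     for token in args:
--         if seen_command:
--             result.append(_MULTICHAR_SHORT_FLAGS.get(token, token))
--         elif token in _TOP_LEVEL_SHORT_FLAGS:
--             result.append(_TOP_LEVEL_SHORT_FLAGS[token])
--         elif not token.startswith("-"):
--             seen_command = True
--             result.append(token)
--         else:
--             result.append(token)
--     return result
-- ===== SOURCE B (Python) =====
-- _TOP_LEVEL_SHORT_FLAGS = {"-p": "--profile"}
--
-- _MULTICHAR_SHORT_FLAGS = {
--     "-jv": "--job-variable",
--     "-cl": "--concurrency-limit",
-- }
--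
-- def _normalize_top_level_flags(args: list[str]) -> list[str]:
--     """Recursive descent: peel leading flags, then map everything after the command."""
--     if not args:
--         return []
--     head, tail = args[0], args[1:]
--     if head.startswith("-"):
--         return [_TOP_LEVEL_SHORT_FLAGS.get(head, head)] + _normalize_top_level_flags(tail)
--     return [head] + [_MULTICHAR_SHORT_FLAGS.get(t, t) for t in tail]
-- ===== Notes on version B (the rewrite author's own statement) =====
-- stated objective: alternative
-- what changed: Replaces A's single stateful iteration with a seen_command flag by structural recursion on the list: leading dash-tokens are peeled and rewritten one at a time by recursive calls, and the first non-dash token ends the recursion with the remainder mapped through the multichar table in one go.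
import Mathlib
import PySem

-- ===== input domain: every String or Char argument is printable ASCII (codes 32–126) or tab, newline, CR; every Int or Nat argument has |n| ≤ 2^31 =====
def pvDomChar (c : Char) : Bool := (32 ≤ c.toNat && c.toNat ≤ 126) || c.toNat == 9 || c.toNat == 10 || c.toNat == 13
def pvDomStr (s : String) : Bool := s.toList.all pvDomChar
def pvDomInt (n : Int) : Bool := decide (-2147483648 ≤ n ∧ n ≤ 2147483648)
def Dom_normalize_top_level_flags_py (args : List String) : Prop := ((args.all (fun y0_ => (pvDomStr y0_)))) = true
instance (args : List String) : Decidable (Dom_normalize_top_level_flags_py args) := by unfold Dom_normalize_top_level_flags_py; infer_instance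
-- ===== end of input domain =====

-- B replaces A's single stateful scan (seen_command flag) by structural recursion that
-- peels leading flags and maps the post-command remainder in one go (objective: alternative).

-- ===== PORT A =====
def pvTopFlags : PySem.Dict String String := PySem.Dict.ofList [("-p", "--profile")]

def pvMultiFlags : PySem.Dict String String :=
  PySem.Dict.ofList [("-jv", "--job-variable"), ("-cl", "--concurrency-limit")]

-- the for-loop of A as structural recursion over (result, seen_command)
def pvLoopA (res : List String) (seen : Bool) : List String → List String
  | [] => res
  | t :: ts =>
    if seen then
      pvLoopA (res ++ [pvMultiFlags.getD t t]) true ts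
    else if (pvTopFlags.get? t).isSome then
      pvLoopA (res ++ [pvTopFlags.getD t t]) false ts
    else if ¬ PySem.Str.startswith t "-" then
      pvLoopA (res ++ [t]) true ts
    else
      pvLoopA (res ++ [t]) false ts

def normalize_top_level_flags_py (args : List String) : List String :=
  pvLoopA [] false args

-- ===== PORT B =====
def normalize_top_level_flags_py_alt : List String → List String
  | [] => []
  | head :: tail =>
    if PySem.Str.startswith head "-" then
      pvTopFlags.getD head head :: normalize_top_level_flags_py_alt tail
    else
      head :: tail.map (fun t => pvMultiFlags.getD t t)

-- ===== PRECONDITION & SPEC =====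
def Spec_normalize_top_level_flags_py (args : List String) (out : List String) : Prop := out = normalize_top_level_flags_py_alt args
instance (args : List String) (out : List String) : Decidable (Spec_normalize_top_level_flags_py args out) := by unfold Spec_normalize_top_level_flags_py; infer_instance

-- ===== CLAIM (what is proved, stated in full; the proofs are below) =====
def Claim_equal_normalize_top_level_flags_py : Prop := ∀ (args : List String), Dom_normalize_top_level_flags_py args → Spec_normalize_top_level_flags_py args (normalize_top_level_flags_py args)

-- ===== LEMMAS AND PROOFS =====
-- after the command token the loop just maps the multichar table over the rest
theorem pvLoopA_true (ts : List String) : ∀ res : List String,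
    pvLoopA res true ts = res ++ ts.map (fun t => pvMultiFlags.getD t t) := by
  induction ts with
  | nil => intro res; simp [pvLoopA]
  | cons t ts ih => intro res; simp [pvLoopA, ih]

theorem pvTop_eq : pvTopFlags = PySem.Dict.mk [("-p", "--profile")] := by decide

theorem pvTop_get? (t : String) :
    pvTopFlags.get? t = if "-p" == t then some "--profile" else none := by
  rw [pvTop_eq, PySem.Dict.get?_mk_cons]
  simp [PySem.Dict.get?]

theorem pvLoopA_false (ts : List String) : ∀ res : List String,
    pvLoopA res false ts = res ++ normalize_top_level_flags_py_alt ts := by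
  induction ts with
  | nil => intro res; simp [pvLoopA, normalize_top_level_flags_py_alt]
  | cons t ts ih =>
    intro res
    by_cases hs : PySem.Chars.startswith t.toList ['-'] = true
    · have hsS : PySem.Str.startswith t "-" = true := by simpa using hs
 -- still in the flag prefix: both the "in dict" and the plain-dash branch append getD t t
      have hstep : pvLoopA res false (t :: ts)
          = pvLoopA (res ++ [pvTopFlags.getD t t]) false ts := by
        by_cases hin : (pvTopFlags.get? t).isSome
        · simp [pvLoopA, hin]
        · have hd : pvTopFlags.getD t t = t := by
            rw [Option.not_isSome_iff_eq_none] at hin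
            simp [PySem.Dict.getD, hin]
          simp [pvLoopA, hin, PySem.Str.startswith, hs, hd]
      rw [hstep, ih]
      simp [normalize_top_level_flags_py_alt, PySem.Str.startswith, hs]
    · -- t is the command token: recursion in B stops, loop in A flips seen
      have hs' : PySem.Str.startswith t "-" = false := by simpa using hs
      have hsC : PySem.Chars.startswith t.toList ['-'] = false := by simpa using hs
      have hnone : pvTopFlags.get? t = none := by
        rw [pvTop_get?]
        have : ("-p" == t) = false := by
          simp only [beq_eq_false_iff_ne]
          intro he; subst he; exact hs (by decide)
        simp [this]
      have hstep : pvLoopA res false (t :: ts) = pvLoopA (res ++ [t]) true ts := by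
        simp [pvLoopA, hnone, PySem.Str.startswith, hsC]
      rw [hstep, pvLoopA_true]
      simp [normalize_top_level_flags_py_alt, PySem.Str.startswith, hsC]

-- ===== VERDICT (by name: the statement is the Claim_ definition above) =====
theorem normalize_top_level_flags_py_spec : Claim_equal_normalize_top_level_flags_py := by
  intro args _
  show normalize_top_level_flags_py args = normalize_top_level_flags_py_alt args
  rw [normalize_top_level_flags_py, pvLoopA_false]
  simp
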